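-- pv_equiv track=rewrite | github.com/QEF/q-e | dev-tools/mem_counter.py | get_args_list
-- ===== SOURCE A (Python) =====
-- def get_args_list(line):
--   args = ""
--   npar = 0
--   for i, c in enumerate(line):
--     if c == '(':
--       npar +=1
--       continue
--     if c == ')':
--       npar -=1
--       continue
--     if c == '&':
--       continue
--     if c == '\n':
--       continue
--     if c == '!':
--       break
--     if c == '%':
--       # copy argument if needed
--       if npar >= 2:
--         continue
--       if line[i-1] == ')':
--         j = i
--         while (j>0):
--           j = j-1 # this can fail but should never happen
--           if line[j] == '(':
--             break
--
--         args += line[j:i].replace(',','!') # temp replace , with ! to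
--                                            #avoid confusion in arg splitting.
--                                            # btw, we go back in characters so
--                                            # there shouldn't be any '!'
--
--     if npar == 1:
--       args += c
--
--   return [x.replace('!',',') for x in args.split(',')]
-- ===== SOURCE B (Python) =====
-- def get_args_list(line):
--   # Build the argument list directly while scanning: tokens are split on
--   # depth-1 commas as they are met, and at a '%' copy the slice from the
--   # last '(' seen (maintained index) is appended verbatim -- no marker
--   # characters, no final split/replace pass.
--   out = []
--   cur = ""
--   npar = 0
--   last_open = 0
--   for i, c in enumerate(line):
--     if c == '(':
--       npar += 1
--       last_open = i
--     elif c == ')':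
--       npar -= 1
--     elif c == '!':
--       break
--     elif c == '&' or c == '\n':
--       pass
--     else:
--       if c == '%' and npar < 2 and line[i - 1] == ')':
--         cur += line[last_open:i]
--       if npar == 1:
--         if c == ',':
--           out.append(cur)
--           cur = ""
--         else:
--           cur += c
--   out.append(cur)
--   return out
-- ===== Notes on version B (the rewrite author's own statement) =====
-- stated objective: alternative
-- what changed: B builds the list of argument tokens directly in one pass (splitting on depth-1 commas on the fly and copying '%'-chunks verbatim from a maintained last-'(' index) instead of A's marker string with ','->'!' encoding, per-'%' backward scans for '(', and a final split/replace pass.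
import Mathlib
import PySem

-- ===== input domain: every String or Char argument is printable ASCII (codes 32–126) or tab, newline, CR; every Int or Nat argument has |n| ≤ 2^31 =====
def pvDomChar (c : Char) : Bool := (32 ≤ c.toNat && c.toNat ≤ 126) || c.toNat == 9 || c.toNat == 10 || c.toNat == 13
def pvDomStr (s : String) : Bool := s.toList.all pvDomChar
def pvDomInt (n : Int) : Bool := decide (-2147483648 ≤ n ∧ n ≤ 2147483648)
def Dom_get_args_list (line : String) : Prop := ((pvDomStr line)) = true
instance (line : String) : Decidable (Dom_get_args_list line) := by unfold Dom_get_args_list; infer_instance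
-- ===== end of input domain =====

-- B builds the argument list directly (splitting on depth-1 commas on the fly and copying
-- '%'-chunks from a maintained last-'(' index) instead of A's marker string + backward scans
-- + final split/replace pass (objective: alternative).

-- ===== PORT A =====

-- the inner "j = i; while j > 0: j -= 1; if line[j] == '(': break" loop
def pvBackLoop (l : List Char) : Nat → Nat
  | 0 => 0
  | j + 1 => if l.getD j ' ' = '(' then j else pvBackLoop l j

-- `.replace(a, b)` for single characters: a per-char map
def pvRepl (a b : Char) (w : List Char) : List Char :=
  w.map (fun ch => if ch = a then b else ch)

-- the `for i, c in enumerate(line)` body; `rest` is the unprocessed suffix, `i` its start index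
def pvALoop (l : List Char) : List Char → Nat → List Char → Int → List Char
  | [], _, args, _ => args
  | c :: rest, i, args, npar =>
    if c = '(' then pvALoop l rest (i + 1) args (npar + 1)
    else if c = ')' then pvALoop l rest (i + 1) args (npar - 1)
    else if c = '&' then pvALoop l rest (i + 1) args npar
    else if c = '\n' then pvALoop l rest (i + 1) args npar
    else if c = '!' then args
    else if c = '%' ∧ 2 ≤ npar then pvALoop l rest (i + 1) args npar
    else
      let args1 :=
        if c = '%' ∧ PySem.List.pyGet? l ((i : Int) - 1) = some ')' then
          args ++ pvRepl ',' '!' (PySem.List.slice l (some ((pvBackLoop l i : Nat) : Int)) (some ((i : Nat) : Int)))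
        else args
      let args2 := if npar = 1 then args1 ++ [c] else args1
      pvALoop l rest (i + 1) args2 npar

-- `[x.replace('!', ',') for x in args.split(',')]`
def pvPost (args : List Char) : List String :=
  (args.splitOn ',').map (fun w => String.ofList (pvRepl '!' ',' w))

def get_args_list (line : String) : List String :=
  pvPost (pvALoop line.toList line.toList 0 [] 0)

-- ===== PORT B =====

-- state: `out` = finished tokens, `cur` = token under construction, `lastOpen` = index of the last '(' seen
def pvBLoop (l : List Char) : List Char → Nat → List (List Char) → List Char → Int → Nat → List (List Char)
  | [], _, out, cur, _, _ => out ++ [cur]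
  | c :: rest, i, out, cur, npar, lastOpen =>
    if c = '(' then pvBLoop l rest (i + 1) out cur (npar + 1) i
    else if c = ')' then pvBLoop l rest (i + 1) out cur (npar - 1) lastOpen
    else if c = '!' then out ++ [cur]
    else if c = '&' ∨ c = '\n' then pvBLoop l rest (i + 1) out cur npar lastOpen
    else
      let cur1 :=
        if c = '%' ∧ npar < 2 ∧ PySem.List.pyGet? l ((i : Int) - 1) = some ')' then
          cur ++ PySem.List.slice l (some ((lastOpen : Nat) : Int)) (some ((i : Nat) : Int))
        else cur
      if npar = 1 then
        if c = ',' then pvBLoop l rest (i + 1) (out ++ [cur1]) [] npar lastOpen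
        else pvBLoop l rest (i + 1) out (cur1 ++ [c]) npar lastOpen
      else pvBLoop l rest (i + 1) out cur1 npar lastOpen

def get_args_list_alt (line : String) : List String :=
  (pvBLoop line.toList line.toList 0 [] [] 0 0).map String.ofList

-- ===== PRECONDITION & SPEC =====
def Spec_get_args_list (line : String) (out : List String) : Prop := out = get_args_list_alt line
instance (line : String) (out : List String) : Decidable (Spec_get_args_list line out) := by unfold Spec_get_args_list; infer_instance

-- ===== CLAIM (what is proved, stated in full; the proofs are below) =====
def Claim_equal_get_args_list : Prop := ∀ (line : String), Dom_get_args_list line → Spec_get_args_list line (get_args_list line)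

-- ===== LEMMAS AND PROOFS =====

lemma pvSplitOn_cons (a : Char) (xs : List Char) :
    List.splitOn ',' (a :: xs) =
      if a = ',' then [] :: List.splitOn ',' xs
      else (List.splitOn ',' xs).modifyHead (List.cons a) := by
  simp [List.splitOn, List.splitOnP_cons]

lemma pvSplitOn_nil : List.splitOn ',' ([] : List Char) = [[]] := by simp [List.splitOn]

lemma pvSplitOn_ne_nil (xs : List Char) : List.splitOn ',' xs ≠ [] := by
  induction xs with
  | nil => simp [pvSplitOn_nil]
  | cons a xs ih =>
    rw [pvSplitOn_cons]
    split
    · simp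
    · intro h
      exact ih (by simpa using congrArg List.length h)

lemma pvSplitOn_no_sep (ys : List Char) (h : ∀ c ∈ ys, c ≠ ',') :
    List.splitOn ',' ys = [ys] := by
  induction ys with
  | nil => exact pvSplitOn_nil
  | cons a ys ih =>
    rw [pvSplitOn_cons, if_neg (h a (by simp)), ih (fun c hc => h c (by simp [hc]))]
    rfl

-- appending separator-free text extends the last token of the split
lemma pvSplitOn_app_nosep (ys : List Char) (hys : ∀ c ∈ ys, c ≠ ',') :
    ∀ (xs : List Char) (acc : List (List Char)) (cur : List Char),
      List.splitOn ',' xs = acc ++ [cur] →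
      List.splitOn ',' (xs ++ ys) = acc ++ [cur ++ ys] := by
  intro xs
  induction xs with
  | nil =>
    intro acc cur hinv
    rw [pvSplitOn_nil] at hinv
    cases acc with
    | nil =>
      have hcur : cur = [] := by simpa using hinv.symm
      subst hcur
      simpa using pvSplitOn_no_sep ys hys
    | cons a t =>
      exfalso
      have h0 : t ++ [cur] = [] := by simpa using congrArg List.tail hinv
      simp at h0
  | cons a xs ih =>
    intro acc cur hinv
    rw [pvSplitOn_cons] at hinv
    by_cases ha : a = ','
    · rw [if_pos ha] at hinv
      cases acc with
      | nil =>
        exfalso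
        have h1 : List.splitOn ',' xs = [] := by simpa using congrArg List.tail hinv
        exact pvSplitOn_ne_nil xs h1
      | cons a0 t =>
        have h0 : a0 = [] := by simpa using (congrArg List.head? hinv).symm
        have htl : List.splitOn ',' xs = t ++ [cur] := by simpa using congrArg List.tail hinv
        rw [List.cons_append, pvSplitOn_cons, if_pos ha, ih t cur htl, h0]
        rfl
    · rw [if_neg ha] at hinv
      obtain ⟨x, X, hX⟩ := List.exists_cons_of_ne_nil (pvSplitOn_ne_nil xs)
      rw [hX, List.modifyHead_cons] at hinv
      rw [List.cons_append, pvSplitOn_cons, if_neg ha]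
      cases acc with
      | nil =>
        have h1 : X = [] := by simpa using congrArg List.tail hinv
        have h2 : cur = a :: x := by simpa using (congrArg List.head? hinv).symm
        rw [ih [] x (by rw [hX, h1]; rfl)]
        simp [h2]
      | cons a0 t =>
        have h0 : a0 = a :: x := by simpa using (congrArg List.head? hinv).symm
        have htl : X = t ++ [cur] := by simpa using congrArg List.tail hinv
        rw [ih (x :: t) cur (by rw [hX, htl]; rfl)]
        simp [h0]

-- appending a separator closes the current token and opens an empty one
lemma pvSplitOn_app_sep (xs : List Char) :
    List.splitOn ',' (xs ++ [',']) = List.splitOn ',' xs ++ [[]] := by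
  induction xs with
  | nil => simp [pvSplitOn_nil, pvSplitOn_cons]
  | cons a xs ih =>
    rw [List.cons_append, pvSplitOn_cons, pvSplitOn_cons, ih]
    split
    · rfl
    · obtain ⟨x, X, hX⟩ := List.exists_cons_of_ne_nil (pvSplitOn_ne_nil xs)
      rw [hX]
      rfl

-- the mapped (through '!'-restore) invariant versions used by the simulation
lemma pvInv_app_nosep (ys : List Char) (hys : ∀ c ∈ ys, c ≠ ',')
    (xs : List Char) (acc : List (List Char)) (cur : List Char)
    (hinv : (List.splitOn ',' xs).map (pvRepl '!' ',') = acc ++ [cur]) :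
    (List.splitOn ',' (xs ++ ys)).map (pvRepl '!' ',') = acc ++ [cur ++ pvRepl '!' ',' ys] := by
  rw [List.map_eq_append_iff] at hinv
  obtain ⟨s1, s2, hS, hm1, hm2⟩ := hinv
  cases s2 with
  | nil => exact absurd hm2 (by simp)
  | cons y t =>
    cases t with
    | cons z t2 => exact absurd (congrArg List.length hm2) (by simp)
    | nil =>
      have hy : pvRepl '!' ',' y = cur := by simpa using hm2
      have hyy : pvRepl '!' ',' (y ++ ys) = cur ++ pvRepl '!' ',' ys := by
        rw [pvRepl, List.map_append, ← pvRepl, ← pvRepl, hy]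
      rw [pvSplitOn_app_nosep ys hys xs s1 y (by rw [hS]), List.map_append, hm1,
        List.map_singleton, hyy]

lemma pvInv_app_sep (xs : List Char) (acc : List (List Char)) (cur : List Char)
    (hinv : (List.splitOn ',' xs).map (pvRepl '!' ',') = acc ++ [cur]) :
    (List.splitOn ',' (xs ++ [','])).map (pvRepl '!' ',') = (acc ++ [cur]) ++ [[]] := by
  rw [pvSplitOn_app_sep, List.map_append, hinv]
  rfl

lemma pvRepl_no_comma (w : List Char) : ∀ c ∈ pvRepl ',' '!' w, c ≠ ',' := by
  intro c hc
  rw [pvRepl, List.mem_map] at hc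
  obtain ⟨d, _, hd⟩ := hc
  by_cases h : d = ','
  · rw [if_pos h] at hd; rw [← hd]; decide
  · rw [if_neg h] at hd; rw [← hd]; exact h

lemma pvRepl_restore (w : List Char) : (∀ c ∈ w, c ≠ '!') →
    pvRepl '!' ',' (pvRepl ',' '!' w) = w := by
  induction w with
  | nil => intro _; rfl
  | cons a w ih =>
    intro h
    have ha : a ≠ '!' := h a (by simp)
    have hw := ih (fun c hc => h c (List.mem_cons_of_mem _ hc))
    by_cases h2 : a = ','
    · subst h2
      simp only [pvRepl, List.map_cons] at hw ⊢
      simp [hw]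
    · simp only [pvRepl, List.map_cons] at hw ⊢
      simp [hw, h2, ha]

lemma pvSlice_no_bang (l : List Char) (a i : Nat) (h : ∀ k, k < i → l.getD k ' ' ≠ '!') :
    ∀ c ∈ PySem.List.slice l (some ((a : Nat) : Int)) (some ((i : Nat) : Int)), c ≠ '!' := by
  intro c hc
  rw [PySem.List.slice_natCast] at hc
  obtain ⟨j, hj, hje⟩ := List.getElem_of_mem hc
  have hjlen : j < i - a := lt_of_lt_of_le hj (by simpa using List.length_take_le _ _)
  have hjl : a + j < l.length := by
    have := hj
    simp [List.length_take, List.length_drop] at this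
    omega
  have hcj : c = l[a + j] := by
    rw [← hje, List.getElem_take, List.getElem_drop]
  rw [hcj]
  have := h (a + j) (by omega)
  rwa [List.getD_eq_getElem l ' ' hjl] at this

lemma pvBackLoop_succ (l : List Char) (i : Nat) :
    pvBackLoop l (i + 1) = if l.getD i ' ' = '(' then i else pvBackLoop l i := rfl

lemma pvDrop_head (l rest : List Char) (c : Char) (i : Nat) (h : l.drop i = c :: rest) :
    l.getD i ' ' = c := by
  have : l[i]? = some c := by
    rw [← List.head?_drop, h]; rfl
  simp [List.getD, this]

lemma pvDrop_tail (l rest : List Char) (c : Char) (i : Nat) (h : l.drop i = c :: rest) :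
    l.drop (i + 1) = rest := by
  rw [← List.drop_drop, h]; rfl

-- the main simulation: A's marker-string loop, read through split/restore, is B's token loop
lemma pvLoop_eq (l : List Char) :
    ∀ (rest : List Char) (i : Nat) (args : List Char) (npar : Int)
      (acc : List (List Char)) (cur : List Char),
      l.drop i = rest →
      (∀ k, k < i → l.getD k ' ' ≠ '!') →
      (List.splitOn ',' args).map (pvRepl '!' ',') = acc ++ [cur] →
      (List.splitOn ',' (pvALoop l rest i args npar)).map (pvRepl '!' ',') =
        pvBLoop l rest i acc cur npar (pvBackLoop l i) := by
  intro rest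
  induction rest with
  | nil =>
    intro i args npar acc cur _ _ hinv
    simpa [pvALoop, pvBLoop] using hinv
  | cons c rest ih =>
    intro i args npar acc cur hdrop hbang hinv
    have hc : l.getD i ' ' = c := pvDrop_head l rest c i hdrop
    have ht : l.drop (i + 1) = rest := pvDrop_tail l rest c i hdrop
    have hbang' : c ≠ '!' → ∀ k, k < i + 1 → l.getD k ' ' ≠ '!' := by
      intro hne k hk
      rcases Nat.lt_succ_iff_lt_or_eq.mp hk with hlt | heq
      · exact hbang k hlt
      · rw [heq, hc]; exact hne
    by_cases h1 : c = '('
    · subst h1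
      have hb : pvBackLoop l (i + 1) = i := by rw [pvBackLoop_succ, hc, if_pos rfl]
      simp only [pvALoop, pvBLoop, Char.reduceEq, reduceIte, true_or, or_true, false_or, or_false, if_true, if_false]
      rw [ih (i + 1) args (npar + 1) acc cur ht (hbang' (by decide)) hinv, hb]
    · have hb : pvBackLoop l (i + 1) = pvBackLoop l i := by
        rw [pvBackLoop_succ, hc, if_neg h1]
      by_cases h2 : c = ')'
      · subst h2
        simp only [pvALoop, pvBLoop, Char.reduceEq, reduceIte, true_or, or_true, false_or, or_false, if_true, if_false]
        rw [ih (i + 1) args (npar - 1) acc cur ht (hbang' (by decide)) hinv, hb]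
      by_cases h3 : c = '&'
      · subst h3
        simp only [pvALoop, pvBLoop, Char.reduceEq, reduceIte, true_or, or_true, false_or, or_false, if_true, if_false]
        rw [ih (i + 1) args npar acc cur ht (hbang' (by decide)) hinv, hb]
      by_cases h4 : c = '\n'
      · subst h4
        simp only [pvALoop, pvBLoop, Char.reduceEq, reduceIte, true_or, or_true, false_or, or_false, if_true, if_false]
        rw [ih (i + 1) args npar acc cur ht (hbang' (by decide)) hinv, hb]
      by_cases h5 : c = '!'
      · subst h5
        simp only [pvALoop, pvBLoop, Char.reduceEq, reduceIte, true_or, or_true, false_or, or_false, if_true, if_false]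
        exact hinv
      have hbang1 := hbang' h5
      have hor : ¬(c = '&' ∨ c = '\n') := fun h => h.elim h3 h4
      by_cases h6 : c = '%' ∧ 2 ≤ npar
      · -- A skips; B's copy condition and its npar = 1 branch are both false
        have hn6 := h6.2
        simp only [pvALoop, pvBLoop, if_neg h1, if_neg h2, if_neg h3, if_neg h4, if_neg h5,
          if_pos h6, if_neg hor,
          if_neg (show ¬(c = '%' ∧ npar < 2 ∧ PySem.List.pyGet? l ((i : Int) - 1) = some ')') by
            rintro ⟨_, hlt, _⟩; omega),
          if_neg (show ¬ npar = 1 by omega)]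
        rw [ih (i + 1) args npar acc cur ht hbang1 hinv, hb]
      · simp only [pvALoop, pvBLoop, if_neg h1, if_neg h2, if_neg h3, if_neg h4, if_neg h5,
          if_neg h6, if_neg hor]
        by_cases h7 : c = '%' ∧ PySem.List.pyGet? l ((i : Int) - 1) = some ')'
        · have hlt : npar < 2 := by
            by_contra hge
            exact h6 ⟨h7.1, by omega⟩
          have hB7 : c = '%' ∧ npar < 2 ∧ PySem.List.pyGet? l ((i : Int) - 1) = some ')' :=
            ⟨h7.1, hlt, h7.2⟩
          have hinv1 : (List.splitOn ',' (args ++ pvRepl ',' '!' (PySem.List.slice l (some ((pvBackLoop l i : Nat) : Int)) (some ((i : Nat) : Int))))).map (pvRepl '!' ',') =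
              acc ++ [cur ++ PySem.List.slice l (some ((pvBackLoop l i : Nat) : Int)) (some ((i : Nat) : Int))] := by
            rw [pvInv_app_nosep _ (pvRepl_no_comma _) args acc cur hinv,
              pvRepl_restore _ (pvSlice_no_bang l (pvBackLoop l i) i hbang)]
          simp only [if_pos h7, if_pos hB7]
          by_cases h8 : npar = 1
          · have h9 : c ≠ ',' := by rw [h7.1]; decide
            simp only [if_pos h8, if_neg h9]
            have hinv2 := pvInv_app_nosep [c] (by simpa using h9) _ _ _ hinv1
            rw [ih (i + 1) _ npar acc _ ht hbang1 (by simpa [pvRepl, h5] using hinv2), hb]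
            simp [List.append_assoc]
          · simp only [if_neg h8]
            rw [ih (i + 1) _ npar acc _ ht hbang1 hinv1, hb]
        · have hB7 : ¬(c = '%' ∧ npar < 2 ∧ PySem.List.pyGet? l ((i : Int) - 1) = some ')') := by
            rintro ⟨hca, _, hcb⟩; exact h7 ⟨hca, hcb⟩
          simp only [if_neg h7, if_neg hB7]
          by_cases h8 : npar = 1
          · by_cases h9 : c = ','
            · subst h9
              simp only [if_pos h8, Char.reduceEq, reduceIte, if_true, if_false]
              rw [ih (i + 1) _ npar (acc ++ [cur]) [] ht hbang1 (pvInv_app_sep args acc cur hinv), hb]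
            · simp only [if_pos h8, if_neg h9]
              have hinv2 := pvInv_app_nosep [c] (by simpa using h9) _ _ _ hinv
              rw [ih (i + 1) _ npar acc (cur ++ [c]) ht hbang1 (by simpa [pvRepl, h5] using hinv2), hb]
          · simp only [if_neg h8]
            rw [ih (i + 1) args npar acc cur ht hbang1 hinv, hb]

-- ===== VERDICT (by name: the statement is the Claim_ definition above) =====
theorem get_args_list_spec : Claim_equal_get_args_list := by
  intro line _
  unfold Spec_get_args_list get_args_list get_args_list_alt pvPost
  have h := pvLoop_eq line.toList line.toList 0 [] 0 [] [] rfl (by omega)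
    (by simp [pvRepl])
  calc (List.splitOn ',' (pvALoop line.toList line.toList 0 [] 0)).map
        (fun w => String.ofList (pvRepl '!' ',' w))
      = ((List.splitOn ',' (pvALoop line.toList line.toList 0 [] 0)).map (pvRepl '!' ',')).map String.ofList := by
        rw [List.map_map]; rfl
    _ = (pvBLoop line.toList line.toList 0 [] [] 0 0).map String.ofList := by
        rw [h]; rfl
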